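-- pv_equiv track=rewrite | github.com/NetworkManager/NetworkManager | tools/generate-docs-nm-property-infos.py | iter_unique
-- ===== SOURCE A (Python) =====
-- def iter_unique(iterable, default=None):
--     found = False
--     for i in iterable:
--         assert not found
--         found = True
--         i0 = i
--     if found:
--         return i0
--     return default
-- ===== SOURCE B (Python) =====
-- _sentinel = object()
--
-- def iter_unique(iterable, default=None):
--     it = iter(iterable)
--     first = next(it, _sentinel)
--     if first is _sentinel:
--         return default
--     try:
--         next(it)
--     except StopIteration:
--         return first
--     assert False
-- ===== Notes on version B (the rewrite author's own statement) =====
-- stated objective: idiomatic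
-- what changed: Replaces the for-loop with a found flag by explicit iterator driving: take the first element with next(it, sentinel), return default on the sentinel, and probe once more with next inside try/except to decide singleton vs many.
import Mathlib
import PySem

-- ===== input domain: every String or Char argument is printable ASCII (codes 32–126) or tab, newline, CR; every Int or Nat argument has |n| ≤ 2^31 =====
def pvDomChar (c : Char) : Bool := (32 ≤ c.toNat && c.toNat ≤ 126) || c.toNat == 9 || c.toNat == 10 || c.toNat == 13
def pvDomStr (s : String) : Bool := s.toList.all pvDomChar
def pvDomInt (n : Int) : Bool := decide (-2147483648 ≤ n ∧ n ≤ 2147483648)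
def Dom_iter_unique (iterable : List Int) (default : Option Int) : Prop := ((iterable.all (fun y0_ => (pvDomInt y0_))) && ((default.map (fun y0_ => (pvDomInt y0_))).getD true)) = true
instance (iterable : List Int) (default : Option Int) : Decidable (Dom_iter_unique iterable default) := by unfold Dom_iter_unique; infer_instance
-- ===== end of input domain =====

-- B replaces A's for-loop-with-flag by explicit iterator driving (next with sentinel,
-- then one probing next); objective: idiomatic. Return values only; A raises AssertionError
-- on iterables with more than one element (excluded by Pre_), as does B.

-- ===== PORT A =====
-- loop state: found flag and last seen i0 (none before first element).
-- 'assert not found' raises when found = true: modelled as none (excluded by Pre_).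
def iterUniqueLoop (default : Option Int) : List Int → Bool → Option Int → Option Int
  | [], found, i0 => if found then i0 else default
  | _i :: _rest, true, _i0 => none   -- assert not found fails: AssertionError
  | i :: rest, false, _i0 => iterUniqueLoop default rest true (some i)

def iter_unique (iterable : List Int) (default : Option Int) : Option Int :=
  iterUniqueLoop default iterable false none

-- ===== PORT B =====
def iter_unique_alt (iterable : List Int) (default : Option Int) : Option Int :=
  match iterable with
  | [] => default                    -- first is _sentinel
  | first :: rest =>
    match rest with
    | [] => some first               -- second next raised StopIteration
    | _ :: _ => none                 -- assert False: AssertionError (excluded by Pre_)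

-- ===== PRECONDITION & SPEC =====
-- A raises AssertionError on any iterable with two or more elements; exactly those are excluded.
def Pre_iter_unique (iterable : List Int) (default : Option Int) : Prop :=
  iterable.length ≤ 1
instance (iterable : List Int) (default : Option Int) : Decidable (Pre_iter_unique iterable default) := by
  unfold Pre_iter_unique; infer_instance
def pvWitness_iter_unique : List Int × Option Int := ([7], some 3)

def Spec_iter_unique (iterable : List Int) (default : Option Int) (out : Option Int) : Prop := out = iter_unique_alt iterable default
instance (iterable : List Int) (default : Option Int) (out : Option Int) : Decidable (Spec_iter_unique iterable default out) := by unfold Spec_iter_unique; infer_instance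

-- ===== CLAIM (what is proved, stated in full; the proofs are below) =====
def Claim_equal_iter_unique : Prop := ∀ (iterable : List Int) (default : Option Int), Dom_iter_unique iterable default → Pre_iter_unique iterable default → Spec_iter_unique iterable default (iter_unique iterable default)

-- ===== LEMMAS AND PROOFS =====

-- ===== VERDICT (by name: the statement is the Claim_ definition above) =====
theorem iter_unique_spec : Claim_equal_iter_unique := by
  intro iterable default _hdom hpre
  unfold Spec_iter_unique
  match iterable with
  | [] => rfl
  | [x] => rfl
  | x :: y :: rest =>
    exact absurd hpre (by simp [Pre_iter_unique])
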